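-- pv_equiv track=rewrite | github.com/cmedina-dev/AOC-2024 | day_14/day_14.py | check_consecutive_ones
-- ===== SOURCE A (Python) =====
-- def check_consecutive_ones(arr, count):
--     for row in arr:
--         consecutive_count = 0
--         for element in row:
--             if element == 1:
--                 consecutive_count += 1
--                 if consecutive_count >= count:
--                     return True
--             else:
--                 consecutive_count = 0
--     return False
-- ===== SOURCE B (Python) =====
-- from itertools import groupby
--
--
-- def check_consecutive_ones(arr, count):
--     for row in arr:
--         for key, group in groupby(row):
--             if key == 1 and len(list(group)) >= count:
--                 return True
--     return False
-- ===== Notes on version B (the rewrite author's own statement) =====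
-- stated objective: idiomatic
-- what changed: Replaces the running reset-counter over elements by itertools.groupby run-partitioning: each row is split into maximal runs of equal values, and a run with key 1 of length >= count answers True.
import Mathlib
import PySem

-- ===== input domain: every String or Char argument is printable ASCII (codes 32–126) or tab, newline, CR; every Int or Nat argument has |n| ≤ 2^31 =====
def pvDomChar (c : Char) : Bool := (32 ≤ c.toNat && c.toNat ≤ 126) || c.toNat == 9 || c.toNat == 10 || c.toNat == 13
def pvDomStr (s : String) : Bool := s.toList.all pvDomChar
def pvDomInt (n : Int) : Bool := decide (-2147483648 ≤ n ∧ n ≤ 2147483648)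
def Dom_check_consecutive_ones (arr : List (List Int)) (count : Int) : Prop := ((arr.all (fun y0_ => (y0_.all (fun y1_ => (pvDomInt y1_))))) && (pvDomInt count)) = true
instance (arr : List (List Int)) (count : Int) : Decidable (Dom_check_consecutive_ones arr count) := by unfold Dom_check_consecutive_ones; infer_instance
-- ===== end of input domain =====

-- B replaces A's running reset-counter by groupby-style run partitioning (idiomatic; same cost).

-- ===== PORT A =====
-- inner loop of A: running counter `cc` of consecutive ones, early return True
def rowA (count : Int) (cc : Int) : List Int → Bool
  | [] => false
  | e :: rest =>
    if e == 1 then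
      (if count ≤ cc + 1 then true else rowA count (cc + 1) rest)
    else rowA count 0 rest

def check_consecutive_ones (arr : List (List Int)) (count : Int) : Bool :=
  match arr with
  | [] => false
  | row :: rest =>
    if rowA count 0 row then true else check_consecutive_ones rest count

-- ===== PORT B =====
-- port of itertools.groupby on a list of ints: maximal runs as (key, run length)
def runsB : List Int → List (Int × Nat)
  | [] => []
  | a :: l =>
    match runsB l with
    | [] => [(a, 1)]
    | (k, n) :: t => if a == k then (k, n + 1) :: t else (a, 1) :: (k, n) :: t

-- inner loop of B: any run with key 1 and length ≥ count
def rowB (count : Int) (row : List Int) : Bool :=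
  (runsB row).any (fun p => p.1 == 1 && decide (count ≤ (p.2 : Int)))

def check_consecutive_ones_alt (arr : List (List Int)) (count : Int) : Bool :=
  arr.any (fun row => rowB count row)

-- ===== PRECONDITION & SPEC =====
def Spec_check_consecutive_ones (arr : List (List Int)) (count : Int) (out : Bool) : Prop := out = check_consecutive_ones_alt arr count
instance (arr : List (List Int)) (count : Int) (out : Bool) : Decidable (Spec_check_consecutive_ones arr count out) := by unfold Spec_check_consecutive_ones; infer_instance

-- ===== CLAIM (what is proved, stated in full; the proofs are below) =====
def Claim_equal_check_consecutive_ones : Prop := ∀ (arr : List (List Int)) (count : Int), Dom_check_consecutive_ones arr count → Spec_check_consecutive_ones arr count (check_consecutive_ones arr count)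

-- ===== LEMMAS AND PROOFS =====

-- the head group of runsB (a :: l) has key a
lemma runsB_head_key (a : Int) (l : List Int) :
    ∃ n t, runsB (a :: l) = (a, n) :: t ∧ 1 ≤ n := by
  simp only [runsB]
  cases h : runsB l with
  | nil => exact ⟨1, [], rfl, le_refl _⟩
  | cons p t =>
    obtain ⟨k, n⟩ := p
    by_cases hk : a = k
    · subst hk; simp
    · simp [hk]

-- a non-one head element never changes rowB's verdict
lemma rowB_cons_ne_one (count : Int) (e : Int) (rest : List Int) (he : e ≠ 1) :
    rowB count (e :: rest) = rowB count rest := by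
  simp only [rowB, runsB]
  cases h : runsB rest with
  | nil => simp [he]
  | cons p t =>
    obtain ⟨k, n⟩ := p
    have he' : (e == 1) = false := by simpa using he
    by_cases hk : e = k
    · subst hk; simp [he']
    · simp [hk, he']

-- prepending m ≥ 1 ones yields a head group (1, n) with m ≤ n
lemma runsB_rep_ones (m : Nat) (l : List Int) (hm : 1 ≤ m) :
    ∃ n t, runsB (List.replicate m 1 ++ l) = ((1 : Int), n) :: t ∧ m ≤ n := by
  induction m with
  | zero => omega
  | succ m ih =>
    by_cases h0 : m = 0
    · subst h0
      simpa using runsB_head_key 1 l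
    · obtain ⟨n, t, hr, hn⟩ := ih (by omega)
      refine ⟨n + 1, t, ?_, by omega⟩
      have : List.replicate (m + 1) (1 : Int) ++ l = 1 :: (List.replicate m 1 ++ l) := by
        simp [List.replicate_succ]
      rw [this]
      simp only [runsB, hr]
      simp

-- prepending m ones with e ≠ 1 next: runsB splits off the group (1, m)
lemma runsB_rep_ones_ne (m : Nat) (e : Int) (rest : List Int) (hm : 1 ≤ m) (he : e ≠ 1) :
    runsB (List.replicate m 1 ++ e :: rest) = ((1 : Int), m) :: runsB (e :: rest) := by
  induction m with
  | zero => omega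
  | succ m ih =>
    have hcons : List.replicate (m + 1) (1 : Int) ++ e :: rest
        = 1 :: (List.replicate m 1 ++ e :: rest) := by simp [List.replicate_succ]
    rw [hcons]
    by_cases h0 : m = 0
    · subst h0
      obtain ⟨n, t, hr, _⟩ := runsB_head_key e rest
      simp only [List.replicate_zero, List.nil_append]
      conv_lhs => rw [runsB, hr]
      simp [Ne.symm he, hr]
    · conv_lhs => rw [runsB, ih (by omega)]
      simp

-- runsB of a block of m ≥ 1 ones
lemma runsB_replicate_one (m : Nat) (hm : 1 ≤ m) :
    runsB (List.replicate m (1 : Int)) = [(1, m)] := by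
  induction m with
  | zero => omega
  | succ m ih =>
    by_cases hz : m = 0
    · subst hz; simp [runsB]
    · simp [List.replicate_succ, runsB, ih (by omega)]

-- main row lemma: a pending counter of m ones behaves like m prepended ones
lemma row_eq (count : Int) : ∀ (row : List Int) (m : Nat),
    (m = 0 ∨ (m : Int) < count) →
    rowA count (m : Int) row = rowB count (List.replicate m 1 ++ row) := by
  intro row
  induction row with
  | nil =>
    intro m hm
    by_cases h0 : m = 0
    · subst h0; simp [rowA, rowB, runsB]
    · have hlt : (m : Int) < count := hm.resolve_left h0
      rw [List.append_nil]
      simp [rowA, rowB, runsB_replicate_one m (by omega)]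
      omega
  | cons e rest ih =>
    intro m hm
    by_cases he : e = 1
    · subst he
      by_cases hc : count ≤ (m : Int) + 1
      · have hrep : List.replicate m (1 : Int) ++ 1 :: rest
            = List.replicate (m + 1) 1 ++ rest := by
          simp [List.replicate_succ']
        rw [hrep]
        obtain ⟨n, t, hr, hn⟩ := runsB_rep_ones (m + 1) rest (by omega)
        simp [rowA, hc, rowB, hr]
        left; omega
      · have hstep : rowA count ((m : Int)) (1 :: rest)
            = rowA count ((m : Int) + 1) rest := by
          simp [rowA, hc]
        rw [hstep]
        have hcast : ((m : Int) + 1) = ((m + 1 : Nat) : Int) := by push_cast; ring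
        rw [hcast, ih (m + 1) (Or.inr (by push_cast at hc ⊢; omega))]
        congr 1
        simp [List.replicate_succ']
    · have hstep : rowA count ((m : Int)) (e :: rest) = rowA count 0 rest := by
        simp [rowA, he]
      rw [hstep]
      have h0 : rowA count ((0 : Nat) : Int) rest = rowB count (List.replicate 0 1 ++ rest) :=
        ih 0 (Or.inl rfl)
      simp only [List.replicate_zero, List.nil_append, Nat.cast_zero] at h0
      rw [h0, ← rowB_cons_ne_one count e rest he]
      by_cases hz : m = 0
      · subst hz; simp
      · have hlt : (m : Int) < count := hm.resolve_left hz
        simp [rowB, runsB_rep_ones_ne m e rest (by omega) he]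
        intro h; omega

-- ===== VERDICT (by name: the statement is the Claim_ definition above) =====
theorem check_consecutive_ones_spec : Claim_equal_check_consecutive_ones := by
  intro arr count hD
  clear hD
  unfold Spec_check_consecutive_ones
  induction arr with
  | nil => simp [check_consecutive_ones, check_consecutive_ones_alt]
  | cons row rest ih =>
    have hrow : rowA count 0 row = rowB count row := by
      simpa using row_eq count row 0 (Or.inl rfl)
    simp only [check_consecutive_ones, check_consecutive_ones_alt, List.any_cons, hrow]
    simp only [check_consecutive_ones_alt] at ih
    cases h : rowB count row
    · simp [ih]
    · simp
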